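-- pv_equiv track=rewrite | github.com/jc-the-github/3-mp-scraper | main_script.py | separate_listings
-- ===== SOURCE A (Python) =====
-- def separate_listings(all_listings):
--     """Splits a master list into categorized queues."""
--     queues = {
--         'cl_car': [],
--         'cl_boat': [],
--         'fbm_car': [],
--         'fbm_boat': [],
--         'offerup_car': [],
--         'offerup_boat': []
--     }
--
--     for listing in all_listings:
--         source = listing.get('source') # e.g., 'craigslist', 'fbm', 'offerup'
--         category = listing.get('category') # e.g., 'car', 'boat'
--
--         if source == 'Craigslist' and category == 'car':
--             queues['cl_car'].append(listing)
--         elif source == 'Craigslist' and category == 'boat':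
--             queues['cl_boat'].append(listing)
--         elif source == 'Facebook' and category == 'car':
--             queues['fbm_car'].append(listing)
--         elif source == 'Facebook' and category == 'boat':
--             queues['fbm_boat'].append(listing)
--         elif source == 'OfferUp' and category == 'car':
--             queues['offerup_car'].append(listing)
--         elif source == 'OfferUp' and category == 'boat':
--             queues['offerup_boat'].append(listing)
--         # ... add elif for fbm_car, fbm_boat, offerup_car, offerup_boat
--
--     return queues
-- ===== SOURCE B (Python) =====
-- def separate_listings(all_listings):
--     """Splits a master list into categorized queues."""
--     def wanted(listing, source, category):
--         return (listing.get('source') == source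
--                 and listing.get('category') == category)
--
--     specs = [('cl_car', 'Craigslist', 'car'),
--              ('cl_boat', 'Craigslist', 'boat'),
--              ('fbm_car', 'Facebook', 'car'),
--              ('fbm_boat', 'Facebook', 'boat'),
--              ('offerup_car', 'OfferUp', 'car'),
--              ('offerup_boat', 'OfferUp', 'boat')]
--     return {key: [l for l in all_listings if wanted(l, source, category)]
--             for key, source, category in specs}
-- ===== Notes on version B (the rewrite author's own statement) =====
-- stated objective: alternative
-- what changed: Instead of a single pass that dispatches each listing into one of six mutable buckets, B makes six independent filter passes, one per (queue, source, category) spec, building each queue as a comprehension; correct because A's dispatch conditions are mutually exclusive and each queue keeps the listings in input order.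
import Mathlib
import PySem

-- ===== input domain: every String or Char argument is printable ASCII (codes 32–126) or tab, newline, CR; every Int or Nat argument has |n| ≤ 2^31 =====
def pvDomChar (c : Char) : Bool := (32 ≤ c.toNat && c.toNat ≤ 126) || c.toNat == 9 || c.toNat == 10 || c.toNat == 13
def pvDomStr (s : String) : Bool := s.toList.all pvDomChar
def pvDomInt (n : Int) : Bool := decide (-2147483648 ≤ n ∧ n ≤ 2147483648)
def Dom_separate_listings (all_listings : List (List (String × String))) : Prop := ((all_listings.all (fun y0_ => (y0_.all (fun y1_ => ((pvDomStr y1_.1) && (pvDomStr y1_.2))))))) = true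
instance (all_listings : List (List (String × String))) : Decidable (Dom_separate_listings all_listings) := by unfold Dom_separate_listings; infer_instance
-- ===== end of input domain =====

-- B replaces A's single dispatch loop over six mutable buckets with six independent filter passes, one per (queue, source, category) spec (alternative decomposition; same result since the conditions are mutually exclusive and order is preserved).

-- ===== PORT A =====
def sepInitA : PySem.Dict String (List (List (String × String))) :=
  PySem.Dict.mk [("cl_car", []), ("cl_boat", []), ("fbm_car", []), ("fbm_boat", []),
                 ("offerup_car", []), ("offerup_boat", [])]

def sepStepA (q : PySem.Dict String (List (List (String × String))))
    (listing : List (String × String)) : PySem.Dict String (List (List (String × String))) :=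
  let source := (PySem.Dict.mk listing).get? "source"
  let category := (PySem.Dict.mk listing).get? "category"
  if source = some "Craigslist" ∧ category = some "car" then q.modify "cl_car" [] (· ++ [listing])
  else if source = some "Craigslist" ∧ category = some "boat" then q.modify "cl_boat" [] (· ++ [listing])
  else if source = some "Facebook" ∧ category = some "car" then q.modify "fbm_car" [] (· ++ [listing])
  else if source = some "Facebook" ∧ category = some "boat" then q.modify "fbm_boat" [] (· ++ [listing])
  else if source = some "OfferUp" ∧ category = some "car" then q.modify "offerup_car" [] (· ++ [listing])
  else if source = some "OfferUp" ∧ category = some "boat" then q.modify "offerup_boat" [] (· ++ [listing])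
  else q

def separate_listings (all_listings : List (List (String × String))) : List (String × List (List (String × String))) :=
  (all_listings.foldl sepStepA sepInitA).items

-- ===== PORT B =====
-- B's helper `wanted(listing, source, category)`
def sepWanted (listing : List (String × String)) (source category : String) : Bool :=
  ((PySem.Dict.mk listing).get? "source" == some source) &&
  ((PySem.Dict.mk listing).get? "category" == some category)

-- B's `specs` table
def sepSpecs : List (String × String × String) :=
  [("cl_car", "Craigslist", "car"), ("cl_boat", "Craigslist", "boat"),
   ("fbm_car", "Facebook", "car"), ("fbm_boat", "Facebook", "boat"),
   ("offerup_car", "OfferUp", "car"), ("offerup_boat", "OfferUp", "boat")]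

-- B's dict comprehension: for each spec, one filter pass over all_listings (keys are distinct, so the dict's items are exactly this map)
def separate_listings_alt (all_listings : List (List (String × String))) : List (String × List (List (String × String))) :=
  sepSpecs.map (fun spec => (spec.1, all_listings.filter (fun l => sepWanted l spec.2.1 spec.2.2)))

-- ===== PRECONDITION & SPEC =====
def Spec_separate_listings (all_listings : List (List (String × String))) (out : List (String × List (List (String × String)))) : Prop := out = separate_listings_alt all_listings
instance (all_listings : List (List (String × String))) (out : List (String × List (List (String × String)))) : Decidable (Spec_separate_listings all_listings out) := by unfold Spec_separate_listings; infer_instance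

-- ===== CLAIM =====
def Claim_equal_separate_listings : Prop := ∀ (all_listings : List (List (String × String))), Dom_separate_listings all_listings → Spec_separate_listings all_listings (separate_listings all_listings)

-- ===== LEMMAS AND PROOFS =====
theorem sepWanted_eq_false (l : List (String × String)) (s c : String)
    (h : ¬((PySem.Dict.mk l).get? "source" = some s ∧ (PySem.Dict.mk l).get? "category" = some c)) :
    sepWanted l s c = false := by
  rw [Bool.eq_false_iff]
  intro ht
  exact h (by simpa [sepWanted] using ht)

-- Invariant: folding A's dispatch step from the six-bucket dict with arbitrary current contents
-- v1..v6 appends, to each bucket, exactly B's filter of the remaining listings.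
theorem sep_fold_items (xs : List (List (String × String)))
    (v1 v2 v3 v4 v5 v6 : List (List (String × String))) :
    (xs.foldl sepStepA (PySem.Dict.mk [("cl_car", v1), ("cl_boat", v2), ("fbm_car", v3), ("fbm_boat", v4), ("offerup_car", v5), ("offerup_boat", v6)])).items =
    [("cl_car", v1 ++ xs.filter (fun l => sepWanted l "Craigslist" "car")), ("cl_boat", v2 ++ xs.filter (fun l => sepWanted l "Craigslist" "boat")), ("fbm_car", v3 ++ xs.filter (fun l => sepWanted l "Facebook" "car")), ("fbm_boat", v4 ++ xs.filter (fun l => sepWanted l "Facebook" "boat")), ("offerup_car", v5 ++ xs.filter (fun l => sepWanted l "OfferUp" "car")), ("offerup_boat", v6 ++ xs.filter (fun l => sepWanted l "OfferUp" "boat"))] := by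
  induction xs generalizing v1 v2 v3 v4 v5 v6 with
  | nil => simp
  | cons l xs ih =>
    simp only [List.foldl_cons, sepStepA]
    split_ifs with h1 h2 h3 h4 h5 h6
    · obtain ⟨hs, hc⟩ := h1
      rw [show (PySem.Dict.mk
          [("cl_car", v1), ("cl_boat", v2), ("fbm_car", v3), ("fbm_boat", v4), ("offerup_car", v5), ("offerup_boat", v6)]).modify "cl_car" [] (· ++ [l]) =
          PySem.Dict.mk [("cl_car", v1 ++ [l]), ("cl_boat", v2), ("fbm_car", v3), ("fbm_boat", v4), ("offerup_car", v5), ("offerup_boat", v6)] from rfl, ih]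
      simp [sepWanted, hs, hc, List.append_assoc]
    · obtain ⟨hs, hc⟩ := h2
      rw [show (PySem.Dict.mk
          [("cl_car", v1), ("cl_boat", v2), ("fbm_car", v3), ("fbm_boat", v4), ("offerup_car", v5), ("offerup_boat", v6)]).modify "cl_boat" [] (· ++ [l]) =
          PySem.Dict.mk [("cl_car", v1), ("cl_boat", v2 ++ [l]), ("fbm_car", v3), ("fbm_boat", v4), ("offerup_car", v5), ("offerup_boat", v6)] from rfl, ih]
      simp [sepWanted, hs, hc, List.append_assoc]
    · obtain ⟨hs, hc⟩ := h3
      rw [show (PySem.Dict.mk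
          [("cl_car", v1), ("cl_boat", v2), ("fbm_car", v3), ("fbm_boat", v4), ("offerup_car", v5), ("offerup_boat", v6)]).modify "fbm_car" [] (· ++ [l]) =
          PySem.Dict.mk [("cl_car", v1), ("cl_boat", v2), ("fbm_car", v3 ++ [l]), ("fbm_boat", v4), ("offerup_car", v5), ("offerup_boat", v6)] from rfl, ih]
      simp [sepWanted, hs, hc, List.append_assoc]
    · obtain ⟨hs, hc⟩ := h4
      rw [show (PySem.Dict.mk
          [("cl_car", v1), ("cl_boat", v2), ("fbm_car", v3), ("fbm_boat", v4), ("offerup_car", v5), ("offerup_boat", v6)]).modify "fbm_boat" [] (· ++ [l]) =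
          PySem.Dict.mk [("cl_car", v1), ("cl_boat", v2), ("fbm_car", v3), ("fbm_boat", v4 ++ [l]), ("offerup_car", v5), ("offerup_boat", v6)] from rfl, ih]
      simp [sepWanted, hs, hc, List.append_assoc]
    · obtain ⟨hs, hc⟩ := h5
      rw [show (PySem.Dict.mk
          [("cl_car", v1), ("cl_boat", v2), ("fbm_car", v3), ("fbm_boat", v4), ("offerup_car", v5), ("offerup_boat", v6)]).modify "offerup_car" [] (· ++ [l]) =
          PySem.Dict.mk [("cl_car", v1), ("cl_boat", v2), ("fbm_car", v3), ("fbm_boat", v4), ("offerup_car", v5 ++ [l]), ("offerup_boat", v6)] from rfl, ih]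
      simp [sepWanted, hs, hc, List.append_assoc]
    · obtain ⟨hs, hc⟩ := h6
      rw [show (PySem.Dict.mk
          [("cl_car", v1), ("cl_boat", v2), ("fbm_car", v3), ("fbm_boat", v4), ("offerup_car", v5), ("offerup_boat", v6)]).modify "offerup_boat" [] (· ++ [l]) =
          PySem.Dict.mk [("cl_car", v1), ("cl_boat", v2), ("fbm_car", v3), ("fbm_boat", v4), ("offerup_car", v5), ("offerup_boat", v6 ++ [l])] from rfl, ih]
      simp [sepWanted, hs, hc, List.append_assoc]
    · rw [ih]
      simp [List.filter_cons, sepWanted_eq_false l _ _ h1, sepWanted_eq_false l _ _ h2,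
        sepWanted_eq_false l _ _ h3, sepWanted_eq_false l _ _ h4,
        sepWanted_eq_false l _ _ h5, sepWanted_eq_false l _ _ h6]

-- ===== VERDICT =====
theorem separate_listings_spec : Claim_equal_separate_listings := by
  intro all_listings _
  unfold Spec_separate_listings separate_listings separate_listings_alt sepInitA
  rw [sep_fold_items]
  simp [sepSpecs]
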